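-- pv_equiv track=rewrite | github.com/LiuJiang20/douDiZhuAI | utility.py | getTrios
-- ===== SOURCE A (Python) =====
-- from typing import List, Tuple
--
-- def getTrios(hand: List[int], lastPlay=None):
--     trios = set()
--     handSize = len(hand)
--     pos = 2
--     while pos < handSize:
--         if hand[pos] == hand[pos - 1] and hand[pos] == hand[pos - 2] and (not lastPlay or hand[pos] > lastPlay[0]):
--             trios.add((hand[pos],) * 3)
--         pos += 1
--     return sorted(list(trios))
-- ===== SOURCE B (Python) =====
-- def getTrios(hand, lastPlay=None):
--     n = len(hand)
--     result = []
--     for v in sorted(set(hand)):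
--         if (not lastPlay or v > lastPlay[0]) and any(hand[i:i + 3] == [v] * 3 for i in range(n - 2)):
--             result.append((v, v, v))
--     return result
-- ===== Notes on version B (the rewrite author's own statement) =====
-- stated objective: alternative
-- what changed: Replaces A's single window scan collecting triples into a set and sorting them by a candidate-driven search: iterate the sorted distinct values of the hand and, for each candidate, test whether [v,v,v] occurs as a contiguous slice, emitting the output already in order with no set of triples and no final sort.
import Mathlib
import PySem

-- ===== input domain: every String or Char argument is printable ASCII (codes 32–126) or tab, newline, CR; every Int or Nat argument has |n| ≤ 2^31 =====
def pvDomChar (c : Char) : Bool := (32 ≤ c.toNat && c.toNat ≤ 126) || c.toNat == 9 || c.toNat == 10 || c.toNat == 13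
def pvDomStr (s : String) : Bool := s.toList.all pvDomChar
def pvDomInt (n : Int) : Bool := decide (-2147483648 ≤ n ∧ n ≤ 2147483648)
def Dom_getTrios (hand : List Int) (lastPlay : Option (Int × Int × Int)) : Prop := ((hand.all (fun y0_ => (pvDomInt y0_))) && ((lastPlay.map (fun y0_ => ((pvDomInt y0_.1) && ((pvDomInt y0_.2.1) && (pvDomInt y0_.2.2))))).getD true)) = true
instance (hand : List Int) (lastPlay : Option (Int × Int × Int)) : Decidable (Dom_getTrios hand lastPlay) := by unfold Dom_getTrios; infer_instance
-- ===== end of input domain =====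

-- B replaces A's window scan + set + final sort by a candidate-driven search: iterate the
-- sorted distinct values of the hand and test each for a contiguous [v,v,v] slice,
-- emitting the output already in order (alternative decomposition; same results).

-- ===== PORT A =====
-- Python sorts the set of triples lexicographically; every element is a diagonal triple
-- (v, v, v), so sorting with key = first component is exact here.
def getTrios (hand : List Int) (lastPlay : Option (Int × Int × Int)) : List (Int × Int × Int) :=
  let trios : PySem.Set (Int × Int × Int) := PySem.Set.empty
  let handSize := PySem.List.len hand
  let trios := (PySem.List.pyRange 2 handSize 1).foldl (fun trios pos =>
    if PySem.List.pyGetD hand pos 0 == PySem.List.pyGetD hand (pos - 1) 0 &&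
       PySem.List.pyGetD hand pos 0 == PySem.List.pyGetD hand (pos - 2) 0 &&
       (match lastPlay with
        | none => true
        | some lp => decide (PySem.List.pyGetD hand pos 0 > lp.1)) then
      PySem.Set.add trios
        (PySem.List.pyGetD hand pos 0, PySem.List.pyGetD hand pos 0, PySem.List.pyGetD hand pos 0)
    else trios) trios
  PySem.List.sorted trios (fun t => t.1) false

-- ===== PORT B =====
-- (not lastPlay or v > lastPlay[0]); a 3-tuple is always truthy in Python.
def pvBeats (lastPlay : Option (Int × Int × Int)) (v : Int) : Bool :=
  match lastPlay with
  | none => true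
  | some lp => decide (v > lp.1)

-- any(hand[i:i+3] == [v]*3 for i in range(n - 2))
def pvHasRun (hand : List Int) (v : Int) : Bool :=
  (PySem.List.pyRange 0 (PySem.List.len hand - 2) 1).any
    (fun i => PySem.List.slice hand (some i) (some (i + 3)) == [v, v, v])

def getTrios_alt (hand : List Int) (lastPlay : Option (Int × Int × Int)) : List (Int × Int × Int) :=
  (PySem.List.sorted (PySem.Set.ofList hand) (fun v => v) false).foldl
    (fun result v =>
      if pvBeats lastPlay v && pvHasRun hand v then result ++ [(v, v, v)] else result)
    []

-- ===== PRECONDITION & SPEC =====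
def Spec_getTrios (hand : List Int) (lastPlay : Option (Int × Int × Int)) (out : List (Int × Int × Int)) : Prop := out = getTrios_alt hand lastPlay
instance (hand : List Int) (lastPlay : Option (Int × Int × Int)) (out : List (Int × Int × Int)) : Decidable (Spec_getTrios hand lastPlay out) := by unfold Spec_getTrios; infer_instance

-- ===== CLAIM (what is proved, stated in full; the proofs are below) =====
def Claim_equal_getTrios : Prop := ∀ (hand : List Int) (lastPlay : Option (Int × Int × Int)), Dom_getTrios hand lastPlay → Spec_getTrios hand lastPlay (getTrios hand lastPlay)

-- ===== LEMMAS AND PROOFS =====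

-- "hand has a window of three consecutive equal cards of value v"
def pvW (H : List Int) (v : Int) : Prop :=
  ∃ i : Nat, H[i]? = some v ∧ H[i + 1]? = some v ∧ H[i + 2]? = some v

theorem pv_take3_eq (l : List Int) (v : Int) :
    l.take 3 = [v, v, v] ↔ l[0]? = some v ∧ l[1]? = some v ∧ l[2]? = some v := by
  rcases l with _ | ⟨a, _ | ⟨b, _ | ⟨c, t⟩⟩⟩ <;> simp [List.take]

theorem pv_hasRun_iff (hand : List Int) (v : Int) :
    pvHasRun hand v = true ↔ pvW hand v := by
  unfold pvHasRun pvW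
  rw [List.any_eq_true]
  constructor
  · rintro ⟨i, hi, hsl⟩
    obtain ⟨h0, hlt⟩ := PySem.List.mem_pyRange_one.mp hi
    rw [PySem.List.len_eq] at hlt
    rw [beq_iff_eq, PySem.List.slice_toNat hand h0 (by omega)] at hsl
    have h3 : (i + 3).toNat - i.toNat = 3 := by omega
    rw [h3, pv_take3_eq] at hsl
    refine ⟨i.toNat, ?_, ?_, ?_⟩
    · simpa [List.getElem?_drop] using hsl.1
    · simpa [List.getElem?_drop] using hsl.2.1
    · simpa [List.getElem?_drop] using hsl.2.2
  · rintro ⟨j, h0, h1, h2⟩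
    have hj2 : j + 2 < hand.length := by
      by_contra hc
      rw [List.getElem?_eq_none (by omega)] at h2; simp at h2
    refine ⟨(j : Int), ?_, ?_⟩
    · apply PySem.List.mem_pyRange_one.mpr
      rw [PySem.List.len_eq]
      constructor
      · exact_mod_cast Nat.zero_le j
      · omega
    · rw [beq_iff_eq, PySem.List.slice_toNat hand (by positivity) (by positivity)]
      have h3 : ((j : Int) + 3).toNat - ((j : Int)).toNat = 3 := by omega
      rw [h3, pv_take3_eq]
      refine ⟨?_, ?_, ?_⟩ <;> simp [List.getElem?_drop] <;>
        simpa [Nat.add_comm] using (by assumption : _)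

-- generic fact: membership in the fold that conditionally adds to a set
theorem pv_mem_foldl_addif {α β : Type} [BEq α] [LawfulBEq α] (g : β → α) (q : β → Bool) :
    ∀ (L : List β) (s : PySem.Set α) (y : α),
      (y ∈ L.foldl (fun s p => if q p then PySem.Set.add s (g p) else s) s ↔
        y ∈ s ∨ ∃ p ∈ L, q p = true ∧ y = g p) := by
  intro L
  induction L with
  | nil => simp
  | cons p ps ih =>
    intro s y
    simp only [List.foldl_cons]
    by_cases hq : q p
    · rw [hq, if_pos rfl, ih, PySem.Set.mem_add]
      constructor
      · rintro ((h | h) | h)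
        · exact Or.inl h
        · exact Or.inr ⟨p, by simp, hq, h⟩
        · obtain ⟨p', hp', hq', hy⟩ := h
          exact Or.inr ⟨p', by simp [hp'], hq', hy⟩
      · rintro (h | ⟨p', hp', hq', hy⟩)
        · exact Or.inl (Or.inl h)
        · rcases List.mem_cons.mp hp' with rfl | hmem
          · exact Or.inl (Or.inr hy)
          · exact Or.inr ⟨p', hmem, hq', hy⟩
    · rw [if_neg (by simpa using hq), ih]
      constructor
      · rintro (h | ⟨p', hp', hq', hy⟩)
        · exact Or.inl h
        · exact Or.inr ⟨p', by simp [hp'], hq', hy⟩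
      · rintro (h | ⟨p', hp', hq', hy⟩)
        · exact Or.inl h
        · rcases List.mem_cons.mp hp' with rfl | hmem
          · exact absurd hq' (by simpa using hq)
          · exact Or.inr ⟨p', hmem, hq', hy⟩

theorem pv_nodup_foldl_addif {α β : Type} [BEq α] [LawfulBEq α] (g : β → α) (q : β → Bool) :
    ∀ (L : List β) (s : PySem.Set α), s.Nodup →
      (L.foldl (fun s p => if q p then PySem.Set.add s (g p) else s) s).Nodup := by
  intro L
  induction L with
  | nil => intro s hs; simpa using hs
  | cons p ps ih =>
    intro s hs
    simp only [List.foldl_cons]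
    by_cases hq : q p
    · rw [hq, if_pos rfl]; exact ih _ (PySem.Set.nodup_add _ _ hs)
    · rw [if_neg (by simpa using hq)]; exact ih _ hs

-- characterisation of A's accumulated set
theorem pv_memA (hand : List Int) (lastPlay : Option (Int × Int × Int)) (y : Int × Int × Int) :
    (y ∈ (PySem.List.pyRange 2 (PySem.List.len hand) 1).foldl (fun trios pos =>
        if PySem.List.pyGetD hand pos 0 == PySem.List.pyGetD hand (pos - 1) 0 &&
           PySem.List.pyGetD hand pos 0 == PySem.List.pyGetD hand (pos - 2) 0 &&
           (match lastPlay with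
            | none => true
            | some lp => decide (PySem.List.pyGetD hand pos 0 > lp.1)) then
          PySem.Set.add trios
            (PySem.List.pyGetD hand pos 0, PySem.List.pyGetD hand pos 0, PySem.List.pyGetD hand pos 0)
        else trios) PySem.Set.empty) ↔
      ∃ v : Int, pvW hand v ∧ pvBeats lastPlay v = true ∧ y = (v, v, v) := by
  rw [pv_mem_foldl_addif
    (fun pos => (PySem.List.pyGetD hand pos 0, PySem.List.pyGetD hand pos 0, PySem.List.pyGetD hand pos 0))
    (fun pos => PySem.List.pyGetD hand pos 0 == PySem.List.pyGetD hand (pos - 1) 0 &&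
        PySem.List.pyGetD hand pos 0 == PySem.List.pyGetD hand (pos - 2) 0 &&
        (match lastPlay with
         | none => true
         | some lp => decide (PySem.List.pyGetD hand pos 0 > lp.1)))]
  simp only [PySem.Set.empty, List.not_mem_nil, false_or]
  constructor
  · rintro ⟨pos, hmem, hq, hy⟩
    have hrange := (PySem.List.mem_pyRange_one.mp hmem)
    have hlen : PySem.List.len hand = (hand.length : Int) := by simp [PySem.List.len_eq]
    rw [hlen] at hrange
    obtain ⟨h2, hlt⟩ := hrange
    set i : Nat := pos.toNat - 2 with hi
    have hpos : pos = ((i + 2 : Nat) : Int) := by omega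
    have hi2 : i + 2 < hand.length := by omega
    have e2 : PySem.List.pyGetD hand pos 0 = hand[i + 2] := by
      rw [hpos, PySem.List.pyGetD_natCast]; exact List.getD_eq_getElem _ _ hi2
    have e1 : PySem.List.pyGetD hand (pos - 1) 0 = hand[i + 1] := by
      have : pos - 1 = ((i + 1 : Nat) : Int) := by omega
      rw [this, PySem.List.pyGetD_natCast]; exact List.getD_eq_getElem _ _ (by omega)
    have e0 : PySem.List.pyGetD hand (pos - 2) 0 = hand[i] := by
      have : pos - 2 = ((i : Nat) : Int) := by omega
      rw [this, PySem.List.pyGetD_natCast]; exact List.getD_eq_getElem _ _ (by omega)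
    rw [e0, e1, e2] at hq
    rw [e2] at hy
    simp only [Bool.and_eq_true, beq_iff_eq] at hq
    obtain ⟨⟨hb1, hb2⟩, hb3⟩ := hq
    refine ⟨hand[i + 2], ⟨i, ?_, ?_, ?_⟩, ?_, hy⟩
    · rw [List.getElem?_eq_getElem (by omega), hb2]
    · rw [List.getElem?_eq_getElem (by omega), hb1]
    · rw [List.getElem?_eq_getElem hi2]
    · cases lastPlay with
      | none => simp [pvBeats]
      | some lp => simpa [pvBeats] using hb3
  · rintro ⟨v, ⟨i, h0, h1, h2⟩, hb, hy⟩
    have hi2 : i + 2 < hand.length := by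
      by_contra hc
      rw [List.getElem?_eq_none (by omega)] at h2; simp at h2
    have g0 : hand[i] = v := by rw [List.getElem?_eq_getElem (by omega)] at h0; exact Option.some.inj h0
    have g1 : hand[i + 1] = v := by rw [List.getElem?_eq_getElem (by omega)] at h1; exact Option.some.inj h1
    have g2 : hand[i + 2] = v := by rw [List.getElem?_eq_getElem hi2] at h2; exact Option.some.inj h2
    refine ⟨((i + 2 : Nat) : Int), ?_, ?_, ?_⟩
    · apply PySem.List.mem_pyRange_one.mpr
      constructor
      · exact_mod_cast by omega
      · have hlen : PySem.List.len hand = (hand.length : Int) := by simp [PySem.List.len_eq]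
        rw [hlen]; exact_mod_cast hi2
    · have e2 : PySem.List.pyGetD hand ((i + 2 : Nat) : Int) 0 = v := by
        rw [PySem.List.pyGetD_natCast, List.getD_eq_getElem _ _ hi2, g2]
      have e1 : PySem.List.pyGetD hand (((i + 2 : Nat) : Int) - 1) 0 = v := by
        have : ((i + 2 : Nat) : Int) - 1 = ((i + 1 : Nat) : Int) := by omega
        rw [this, PySem.List.pyGetD_natCast, List.getD_eq_getElem _ _ (by omega), g1]
      have e0 : PySem.List.pyGetD hand (((i + 2 : Nat) : Int) - 2) 0 = v := by
        have : ((i + 2 : Nat) : Int) - 2 = ((i : Nat) : Int) := by omega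
        rw [this, PySem.List.pyGetD_natCast, List.getD_eq_getElem _ _ (by omega), g0]
      rw [e0, e1, e2]
      simp only [Bool.and_eq_true, beq_self_eq_true, true_and]
      cases lastPlay with
      | none => rfl
      | some lp => simpa [pvBeats] using hb
    · have e2 : PySem.List.pyGetD hand ((i + 2 : Nat) : Int) 0 = v := by
        rw [PySem.List.pyGetD_natCast, List.getD_eq_getElem _ _ hi2, g2]
      rw [e2]; exact hy

-- ===== VERDICT (by name: the statement is the Claim_ definition above) =====
theorem getTrios_spec : Claim_equal_getTrios := by
  intro hand lastPlay _
  unfold Spec_getTrios getTrios getTrios_alt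
  rw [PySem.List.foldl_append_if]
  set LA := (PySem.List.pyRange 2 (PySem.List.len hand) 1).foldl (fun trios pos =>
    if PySem.List.pyGetD hand pos 0 == PySem.List.pyGetD hand (pos - 1) 0 &&
       PySem.List.pyGetD hand pos 0 == PySem.List.pyGetD hand (pos - 2) 0 &&
       (match lastPlay with
        | none => true
        | some lp => decide (PySem.List.pyGetD hand pos 0 > lp.1)) then
      PySem.Set.add trios
        (PySem.List.pyGetD hand pos 0, PySem.List.pyGetD hand pos 0, PySem.List.pyGetD hand pos 0)
    else trios) PySem.Set.empty with hLA
  set BL := (((PySem.List.sorted (PySem.Set.ofList hand) (fun v => v) false).filter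
      (fun v => pvBeats lastPlay v && pvHasRun hand v)).map (fun v => (v, v, v))) with hBL
  show PySem.List.sorted LA (fun t => t.1) false = [] ++ BL
  rw [List.nil_append]
  -- BL is strictly increasing on the first component
  have hSlt : BL.Pairwise (fun a b : Int × Int × Int => a.1 < b.1) := by
    rw [hBL, List.pairwise_map]
    exact (PySem.List.sorted_ofList_pairwise_lt hand).filter _
  have hBnd : BL.Nodup := hSlt.imp (fun h => by
    intro he; rw [he] at h; exact lt_irrefl _ h)
  -- same members as LA
  have hmem : ∀ y, y ∈ BL ↔ y ∈ LA := by
    intro y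
    rw [hLA, pv_memA, hBL]
    simp only [List.mem_map, List.mem_filter, PySem.List.mem_sorted, Bool.and_eq_true]
    constructor
    · rintro ⟨v, ⟨-, hb, hr⟩, hy⟩
      exact ⟨v, (pv_hasRun_iff hand v).mp hr, hb, hy.symm⟩
    · rintro ⟨v, hw, hb, hy⟩
      have hv : v ∈ hand := by
        obtain ⟨i, h0, -, -⟩ := hw
        exact List.mem_of_getElem? h0
      exact ⟨v, ⟨(PySem.Set.mem_ofList hand v).mpr hv, hb, (pv_hasRun_iff hand v).mpr hw⟩, hy.symm⟩
  have hNA : LA.Nodup := by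
    rw [hLA]
    exact pv_nodup_foldl_addif _ _ _ _ (by simp [PySem.Set.empty])
  have hperm : BL.Perm LA := (List.perm_ext_iff_of_nodup hBnd hNA).mpr hmem
  exact PySem.List.sorted_eq_of_perm_of_pairwise_lt _ _ _ hperm hSlt
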